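-- pv_equiv track=rewrite | github.com/sidharth-r-menon/ieee_case | robot_workcell_agent/skills/placement_solver/scripts/solve_placement.py | get_component
-- ===== SOURCE A (Python) =====
-- def get_component(components, keywords):
--     """Find component by matching keywords in type or name.
--
--     Prioritizes exact component_type matches over substring matches in names
--     to avoid false positives (e.g., 'pallet' in 'carton_to_palletize').
--     """
--     # First pass: Try to match component_type exactly
--     for comp in components:
--         comp_type = comp.get('component_type', '').lower()
--         for kw in keywords:
--             if comp_type == kw or comp_type.startswith(kw):
--                 return comp
--
--     # Second pass: Fall back to substring match in names
--     for comp in components: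
--         comp_type = comp.get('component_type', '').lower()
--         comp_name = comp.get('name', '').lower()
--         for kw in keywords:
--             # Only match if keyword is standalone word (not substring of another word)
--             if (kw in comp_type or kw in comp_name) and comp_type != 'carton':
--                 return comp
--
--     return None
-- ===== SOURCE B (Python) =====
-- def get_component(components, keywords):
--     """Rank each component once (0 = type match, 1 = carton-excluded substring
--     fallback, 2 = no match), then return the first component of the best rank."""
--     def rank(comp):
--         ctype = comp.get('component_type', '').lower()
--         if any(ctype == kw or ctype.startswith(kw) for kw in keywords):
--             return 0
--         cname = comp.get('name', '').lower()
--         if ctype != 'carton' and any(kw in ctype or kw in cname for kw in keywords):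
--             return 1
--         return 2
--     ranked = [(rank(comp), comp) for comp in components]
--     for target in (0, 1):
--         for r, comp in ranked:
--             if r == target:
--                 return comp
--     return None
-- ===== Notes on version B (the rewrite author's own statement) =====
-- stated objective: alternative
-- what changed: Replaced A's two priority passes each re-testing the keyword conditions by a single classification pass that ranks every component once (0=type match, 1=substring fallback, 2=none) followed by a selection loop over the precomputed ranks.
import Mathlib
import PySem

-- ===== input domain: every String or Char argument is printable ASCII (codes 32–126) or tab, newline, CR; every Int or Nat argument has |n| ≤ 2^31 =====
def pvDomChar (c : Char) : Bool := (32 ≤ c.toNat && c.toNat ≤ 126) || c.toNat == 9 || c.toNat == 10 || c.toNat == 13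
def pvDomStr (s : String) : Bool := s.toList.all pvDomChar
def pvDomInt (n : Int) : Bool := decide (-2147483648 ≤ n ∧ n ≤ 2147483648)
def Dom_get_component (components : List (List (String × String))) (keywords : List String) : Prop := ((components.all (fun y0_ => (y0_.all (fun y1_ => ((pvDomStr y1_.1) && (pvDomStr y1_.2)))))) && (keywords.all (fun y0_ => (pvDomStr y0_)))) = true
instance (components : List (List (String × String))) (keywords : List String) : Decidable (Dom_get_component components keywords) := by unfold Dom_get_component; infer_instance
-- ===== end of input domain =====

-- B ranks every component once (0 = type match, 1 = substring fallback, 2 = none)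
-- and then selects the first component of the best rank, instead of A's two
-- priority passes that each re-test the keyword conditions (objective: alternative).

-- ===== PORT A =====
-- comp.get(k, '') on the association-list dict (first match)
def pvGetD (comp : List (String × String)) (k : String) : String :=
  match comp.find? (fun p => p.1 == k) with
  | some p => p.2
  | none => ""

-- first pass: exact / prefix match on component_type
def pvPass1 (keywords : List String) : List (List (String × String)) → Option (List (String × String))
  | [] => none
  | comp :: rest =>
    let comp_type := PySem.Str.lower (pvGetD comp "component_type")
    if keywords.any (fun kw => comp_type == kw || PySem.Str.startswith comp_type kw) then some comp
    else pvPass1 keywords rest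

-- second pass: substring match in type or name, excluding 'carton'
def pvPass2 (keywords : List String) : List (List (String × String)) → Option (List (String × String))
  | [] => none
  | comp :: rest =>
    let comp_type := PySem.Str.lower (pvGetD comp "component_type")
    let comp_name := PySem.Str.lower (pvGetD comp "name")
    if keywords.any (fun kw =>
        (PySem.Str.isIn kw comp_type || PySem.Str.isIn kw comp_name) && comp_type != "carton")
    then some comp
    else pvPass2 keywords rest

def get_component (components : List (List (String × String))) (keywords : List String) : Option (List (String × String)) :=
  match pvPass1 keywords components with
  | some comp => some comp
  | none => pvPass2 keywords components

-- ===== PORT B =====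
-- rank(comp): 0 = type match, 1 = carton-excluded substring fallback, 2 = no match
def pvRank (keywords : List String) (comp : List (String × String)) : Nat :=
  let ctype := PySem.Str.lower (pvGetD comp "component_type")
  if keywords.any (fun kw => ctype == kw || PySem.Str.startswith ctype kw) then 0
  else
    let cname := PySem.Str.lower (pvGetD comp "name")
    if ctype != "carton" &&
        keywords.any (fun kw => PySem.Str.isIn kw ctype || PySem.Str.isIn kw cname) then 1
    else 2

-- 'for target in (0, 1): for (r, comp) in ranked: …'
def pvPick : List Nat → List (Nat × List (String × String)) → Option (List (String × String))
  | [], _ => none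
  | t :: ts, ranked =>
    match ranked.find? (fun p => p.1 == t) with
    | some p => some p.2
    | none => pvPick ts ranked

def get_component_alt (components : List (List (String × String))) (keywords : List String) : Option (List (String × String)) :=
  pvPick [0, 1] (components.map (fun comp => (pvRank keywords comp, comp)))

-- ===== PRECONDITION & SPEC =====
def Spec_get_component (components : List (List (String × String))) (keywords : List String) (out : Option (List (String × String))) : Prop := out = get_component_alt components keywords
instance (components : List (List (String × String))) (keywords : List String) (out : Option (List (String × String))) : Decidable (Spec_get_component components keywords out) := by unfold Spec_get_component; infer_instance

-- ===== CLAIM (what is proved, stated in full; the proofs are below) =====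
def Claim_equal_get_component : Prop := ∀ (components : List (List (String × String))) (keywords : List String), Dom_get_component components keywords → Spec_get_component components keywords (get_component components keywords)

-- ===== LEMMAS AND PROOFS =====

-- factoring the constant conjunct out of the inner any
theorem any_and_const {α : Type} (xs : List α) (p : α → Bool) (b : Bool) :
    xs.any (fun x => p x && b) = (xs.any p && b) := by
  cases b <;> simp

-- pass 1 finds exactly the first rank-0 component
theorem pass1_eq_find0 (keywords : List String) (comps : List (List (String × String))) :
    pvPass1 keywords comps =
      Option.map Prod.snd
        ((comps.map (fun comp => (pvRank keywords comp, comp))).find? (fun p => p.1 == 0)) := by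
  induction comps with
  | nil => rfl
  | cons comp rest ih =>
    simp only [pvPass1, List.map_cons]
    by_cases h1 : (keywords.any (fun kw =>
        PySem.Str.lower (pvGetD comp "component_type") == kw ||
        PySem.Str.startswith (PySem.Str.lower (pvGetD comp "component_type")) kw)) = true
    · rw [if_pos h1]
      have hr : pvRank keywords comp = 0 := by
        simp only [pvRank]; rw [if_pos h1]
      rw [List.find?_cons_of_pos (by simp [hr])]
      rfl
    · rw [if_neg h1]
      have hr : (pvRank keywords comp == 0) = false := by
        simp only [pvRank]; rw [if_neg h1]; split <;> rfl
      rw [List.find?_cons_of_neg (by simpa using hr)]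
      exact ih

-- if pass 1 found nothing, pass 2 finds exactly the first rank-1 component
theorem pass2_eq_find1 (keywords : List String) (comps : List (List (String × String)))
    (h : pvPass1 keywords comps = none) :
    pvPass2 keywords comps =
      Option.map Prod.snd
        ((comps.map (fun comp => (pvRank keywords comp, comp))).find? (fun p => p.1 == 1)) := by
  induction comps with
  | nil => rfl
  | cons comp rest ih =>
    simp only [pvPass1] at h
    by_cases h1 : (keywords.any (fun kw =>
        PySem.Str.lower (pvGetD comp "component_type") == kw ||
        PySem.Str.startswith (PySem.Str.lower (pvGetD comp "component_type")) kw)) = true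
    · rw [if_pos h1] at h; exact absurd h (by simp)
    · rw [if_neg h1] at h
      simp only [pvPass2, List.map_cons]
      rw [any_and_const]
      by_cases h2 : ((keywords.any (fun kw =>
          PySem.Str.isIn kw (PySem.Str.lower (pvGetD comp "component_type")) ||
          PySem.Str.isIn kw (PySem.Str.lower (pvGetD comp "name")))) &&
          (PySem.Str.lower (pvGetD comp "component_type") != "carton")) = true
      · rw [if_pos h2]
        have hr : pvRank keywords comp = 1 := by
          simp only [pvRank]
          rw [if_neg h1, if_pos ((Bool.and_comm _ _).symm.trans h2)]
        rw [List.find?_cons_of_pos (by simp [hr])]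
        rfl
      · rw [if_neg h2]
        have hr : pvRank keywords comp = 2 := by
          simp only [pvRank]
          rw [if_neg h1, if_neg (fun hc => h2 ((Bool.and_comm _ _).symm.trans hc))]
        rw [List.find?_cons_of_neg (by simp [hr])]
        exact ih h

-- ===== VERDICT (by name: the statement is the Claim_ definition above) =====
theorem get_component_spec : Claim_equal_get_component := by
  intro components keywords _
  unfold Spec_get_component get_component get_component_alt
  have h0 := pass1_eq_find0 keywords components
  simp only [pvPick]
  cases hp : pvPass1 keywords components with
  | some comp =>
    rw [hp] at h0
    cases hf : (components.map (fun comp => (pvRank keywords comp, comp))).find? (fun p => p.1 == 0) with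
    | none => rw [hf] at h0; exact absurd h0 (by simp)
    | some p =>
      rw [hf] at h0
      simp only [Option.map_some, Option.some.injEq] at h0
      simp [h0]
  | none =>
    rw [hp] at h0
    cases hf : (components.map (fun comp => (pvRank keywords comp, comp))).find? (fun p => p.1 == 0) with
    | some p => rw [hf] at h0; exact absurd h0.symm (by simp)
    | none =>
      have h1 := pass2_eq_find1 keywords components hp
      cases hg : (components.map (fun comp => (pvRank keywords comp, comp))).find? (fun p => p.1 == 1) with
      | some p =>
        rw [hg] at h1
        simp only [Option.map_some] at h1
        simp [h1]
      | none => rw [hg] at h1; simp [h1]
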